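-- pv_equiv track=rewrite | github.com/hoangph1302/Steganography | lab1/code/methog1.py | findSecretText
-- ===== SOURCE A (Python) =====
-- def ChangetoString(text):
--     result = ''
--     for i in range(len(text)//8):
--         a = text[i*8:(i+1)*8] # every symbol using a 8bit-encode
--         b = int(a,2)
--         result += chr(b+1040)
--     return result
--
-- def findSecretText(data):
--     result = ''
--     index = -1
--     while True:
--         index_c = data.find('c',index+1)
--         index_p = data.find('p',index+1)
--         if (index_c == -1) and (index_p == -1): break
--         if ((index_c < index_p) and (index_c != -1))or(index_p == -1):
--             index = index_c
--             result += '0'  # add bit 0 to result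
--         elif index_p != -1:
--             index = index_p
--             result += '1'  # add bit 1 to result
--     return ChangetoString(result)
-- ===== SOURCE B (Python) =====
-- def findSecretText(data):
--     out = []
--     acc = 0
--     nbits = 0
--     for ch in data:
--         if ch == 'c' or ch == 'p':
--             acc = acc * 2 + (1 if ch == 'p' else 0)
--             nbits += 1
--             if nbits == 8:
--                 out.append(chr(acc + 1040))
--                 acc = 0
--                 nbits = 0
--     return ''.join(out)
-- ===== Notes on version B (the rewrite author's own statement) =====
-- stated objective: faster
-- what changed: Instead of materialising a '0'/'1' bit string via repeated str.find scans (two finds per extracted bit, each rescanning to the next occurrence or the end) and then re-parsing that string 8 characters at a time with int(a,2), B decodes in one streaming pass over data, folding each 'c'/'p' bit into an integer accumulator and emitting a character every 8 bits.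
import Mathlib
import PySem

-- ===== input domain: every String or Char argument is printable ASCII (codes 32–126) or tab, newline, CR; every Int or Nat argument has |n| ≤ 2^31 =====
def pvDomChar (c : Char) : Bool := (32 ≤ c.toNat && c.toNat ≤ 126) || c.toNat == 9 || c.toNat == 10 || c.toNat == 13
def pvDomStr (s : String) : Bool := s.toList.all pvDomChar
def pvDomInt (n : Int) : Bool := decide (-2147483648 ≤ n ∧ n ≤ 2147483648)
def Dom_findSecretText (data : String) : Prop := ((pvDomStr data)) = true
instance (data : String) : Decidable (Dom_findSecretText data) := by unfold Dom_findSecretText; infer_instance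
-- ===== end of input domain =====

-- B replaces A's repeated str.find scanning plus a '0'/'1' bit-string and int(a,2) decoding
-- by one streaming pass folding each 'c'/'p' bit into an integer accumulator (objective: faster, single pass).

-- ===== PORT A =====

-- bound on a successful single-char find, needed by findLoop's termination proof
theorem findFrom_single_bound (data : List Char) (x : Char) (k : Nat) (hk : k ≤ data.length)
    (h : PySem.Chars.findFrom data [x] (k : Int) none ≠ -1) :
    k ≤ (PySem.Chars.findFrom data [x] (k : Int) none).toNat ∧
      (PySem.Chars.findFrom data [x] (k : Int) none).toNat < data.length := by
  rcases PySem.Chars.findFrom_natCast_spec data [x] k hk h with ⟨hle, hpre, -⟩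
  have h1 := hpre.length_le
  rw [List.length_drop] at h1
  simp only [List.length_cons, List.length_nil] at h1
  omega

-- ChangetoString: group the bit string 8 by 8, int(a,2), chr(b+1040)
def changetoString (text : List Char) : List Char :=
  (PySem.List.pyRange 0 (PySem.Int.floordiv (text.length : Int) 8)).foldl
    (fun result i =>
      let a := PySem.List.slice text (some (i * 8)) (some ((i + 1) * 8))
      -- int(a, 2): here a is always 8 chars of '0'/'1', so the parser never fails; the getD 0 is unreachable
      let b := (PySem.Int.ofCharsBase? a 2).getD 0
      result ++ [Char.ofNat (b + 1040).toNat])   -- chr(b + 1040)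
    []

-- the while-True loop of A; Python's 'index' is carried as k = index + 1 (index starts at -1, k at 0);
-- hk is the loop invariant k ≤ len(data), used only for termination
def findLoop (data : List Char) (k : Nat) (hk : k ≤ data.length) (result : List Char) : List Char :=
  let ic := PySem.Chars.findFrom data ['c'] (k : Int) none   -- data.find('c', index+1)
  let ip := PySem.Chars.findFrom data ['p'] (k : Int) none   -- data.find('p', index+1)
  if hbr : ic = -1 ∧ ip = -1 then result                     -- break
  else if h1 : (ic < ip ∧ ic ≠ -1) ∨ ip = -1 then
    have hc : ic ≠ -1 := by
      rcases h1 with ⟨-, h⟩ | h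
      · exact h
      · exact fun hcc => hbr ⟨hcc, h⟩
    have hb := findFrom_single_bound data 'c' k hk hc
    findLoop data (ic.toNat + 1) (by omega) (result ++ ['0'])
  else if h2 : ip ≠ -1 then
    have hb := findFrom_single_bound data 'p' k hk h2
    findLoop data (ip.toNat + 1) (by omega) (result ++ ['1'])
  else result   -- unreachable: ¬h1 forces ip ≠ -1 (Python would loop forever here, but it cannot happen)
termination_by data.length - k
decreasing_by
  · omega
  · omega

def findSecretText (data : String) : String :=
  String.mk (changetoString (findLoop data.toList 0 (Nat.zero_le _) []))

-- ===== PORT B =====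

def findSecretText_alt (data : String) : String :=
  let st := data.toList.foldl
    (fun (s : Int × Nat × List Char) ch =>
      if ch = 'c' ∨ ch = 'p' then
        let acc := s.1 * 2 + (if ch = 'p' then 1 else 0)
        let nbits := s.2.1 + 1
        if nbits = 8 then (0, 0, s.2.2 ++ [Char.ofNat (acc + 1040).toNat])
        else (acc, nbits, s.2.2)
      else s)
    ((0 : Int), (0 : Nat), ([] : List Char))
  String.mk st.2.2

-- ===== PRECONDITION & SPEC =====
def Spec_findSecretText (data : String) (out : String) : Prop := out = findSecretText_alt data
instance (data : String) (out : String) : Decidable (Spec_findSecretText data out) := by unfold Spec_findSecretText; infer_instance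

-- ===== CLAIM (what is proved, stated in full; the proofs are below) =====
def Claim_equal_findSecretText : Prop := ∀ (data : String), Dom_findSecretText data → Spec_findSecretText data (findSecretText data)

-- ===== LEMMAS AND PROOFS =====

-- proof-side vocabulary: the bit stream hidden in data, and the 8-bit decoding both programs perform
def bitChar (b : Bool) : Char := if b then '1' else '0'

def bools (l : List Char) : List Bool :=
  l.filterMap (fun c => if c = 'c' then some false else if c = 'p' then some true else none)

def valB (bs : List Bool) : Int := bs.foldl (fun a b => a * 2 + (if b then 1 else 0)) 0

def emit (v : Int) : Char := Char.ofNat (v + 1040).toNat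

def decode (bs : List Bool) : List Char :=
  if h : 8 ≤ bs.length then emit (valB (bs.take 8)) :: decode (bs.drop 8) else []
termination_by bs.length
decreasing_by simp only [List.length_drop]; omega

def decodeFrom (acc : Int) (nbits : Nat) (bs : List Bool) : List Char :=
  match bs with
  | [] => []
  | b :: rest =>
    if nbits + 1 = 8 then emit (acc * 2 + (if b then 1 else 0)) :: decodeFrom 0 0 rest
    else decodeFrom (acc * 2 + (if b then 1 else 0)) (nbits + 1) rest

def bstep (s : Int × Nat × List Char) (b : Bool) : Int × Nat × List Char :=
  if (if b then 'p' else 'c') = 'c' ∨ (if b then 'p' else 'c') = 'p' then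
    let acc := s.1 * 2 + (if (if b then 'p' else 'c') = 'p' then 1 else 0)
    let nbits := s.2.1 + 1
    if nbits = 8 then (0, 0, s.2.2 ++ [Char.ofNat (acc + 1040).toNat])
    else (acc, nbits, s.2.2)
  else s

-- Python's str.find on a one-char needle, unfolded one character
theorem find_singleton_cons (a x : Char) (l : List Char) :
    PySem.Chars.find (a :: l) [x] =
      if a = x then 0
      else if PySem.Chars.find l [x] = -1 then -1 else PySem.Chars.find l [x] + 1 := by
  by_cases hax : a = x
  · have hinf : [x] <:+: (a :: l) := (List.singleton_infix_iff x (a :: l)).2 (by simp [hax])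
    have h0 : (0:Int) ≤ PySem.Chars.find (a :: l) [x] := (PySem.Chars.find_nonneg_iff _ _).2 hinf
    rcases PySem.Chars.find_spec h0 with ⟨hpre, hmin⟩
    have htz : (PySem.Chars.find (a :: l) [x]).toNat = 0 := by
      by_contra hpos
      exact hmin 0 (Nat.pos_of_ne_zero hpos) (by simp [List.cons_prefix_iff, hax])
    rw [if_pos hax]
    omega
  · by_cases hmem : x ∈ l
    · have hinfl : [x] <:+: l := (List.singleton_infix_iff x l).2 hmem
      have hg0 : (0:Int) ≤ PySem.Chars.find l [x] := (PySem.Chars.find_nonneg_iff _ _).2 hinfl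
      rcases PySem.Chars.find_spec hg0 with ⟨hgpre, hgmin⟩
      have hinf : [x] <:+: (a :: l) := (List.singleton_infix_iff x (a :: l)).2 (by simp [hmem])
      have hf0 : (0:Int) ≤ PySem.Chars.find (a :: l) [x] := (PySem.Chars.find_nonneg_iff _ _).2 hinf
      rcases PySem.Chars.find_spec hf0 with ⟨hfpre, hfmin⟩
      set f := PySem.Chars.find (a :: l) [x] with hf
      set g := PySem.Chars.find l [x] with hg
      have hfne0 : f.toNat ≠ 0 := by
        intro h0
        rw [h0] at hfpre
        rw [List.drop_zero, List.cons_prefix_iff] at hfpre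
        obtain ⟨l', hl', -⟩ := hfpre
        injection hl' with h1 h2
        exact hax h1
      obtain ⟨m, hm⟩ : ∃ m, f.toNat = m + 1 := ⟨f.toNat - 1, by omega⟩
      have hdrop : List.drop f.toNat (a :: l) = List.drop m l := by
        rw [hm]; exact List.drop_succ_cons
      have hge : g.toNat ≤ m := by
        by_contra hlt
        push_neg at hlt
        exact (hgmin m hlt) (hdrop ▸ hfpre)
      have hle : f.toNat ≤ g.toNat + 1 := by
        by_contra hlt
        push_neg at hlt
        exact hfmin (g.toNat + 1) (by omega) (by rw [List.drop_succ_cons]; exact hgpre)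
      have hfg : f = g + 1 := by omega
      rw [hfg]
      have hgne : g ≠ -1 := by omega
      simp [hax, hgne]
    · have h1 : ¬ [x] <:+: l := fun h => hmem ((List.singleton_infix_iff x l).1 h)
      have h2 : ¬ [x] <:+: (a :: l) := fun h => by
        rcases (List.mem_cons).1 ((List.singleton_infix_iff x (a :: l)).1 h) with h' | h'
        · exact hax h'.symm
        · exact hmem h'
      rw [(PySem.Chars.find_eq_neg_one_iff _ _).2 h2, (PySem.Chars.find_eq_neg_one_iff _ _).2 h1]
      simp [hax]

theorem findLoop_congr (data : List Char) (k k' : Nat) (hk : k ≤ data.length)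
    (hk' : k' ≤ data.length) (res : List Char)
    (hc : PySem.Chars.findFrom data ['c'] (k : Int) none = PySem.Chars.findFrom data ['c'] (k' : Int) none)
    (hp : PySem.Chars.findFrom data ['p'] (k : Int) none = PySem.Chars.findFrom data ['p'] (k' : Int) none) :
    findLoop data k hk res = findLoop data k' hk' res := by
  rw [findLoop, findLoop]
  simp only [hc, hp]

-- the while-loop collects, in order, a bit for every 'c' / 'p' of data from position k on
theorem findLoop_eq (data : List Char) :
    ∀ n k (hk : k ≤ data.length), data.length - k ≤ n → ∀ res,
      findLoop data k hk res = res ++ (bools (List.drop k data)).map bitChar := by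
  intro n
  induction n with
  | zero =>
    intro k hk hn res
    have hkl : k = data.length := by omega
    have hdrop : List.drop k data = [] := by rw [hkl, List.drop_length]
    rw [findLoop]
    have hfc : PySem.Chars.findFrom data ['c'] (k : Int) none = -1 := by
      rw [PySem.Chars.findFrom_natCast data ['c'] k hk, hdrop]
      simp [show PySem.Chars.find ([] : List Char) ['c'] = -1 from by decide]
    have hfp : PySem.Chars.findFrom data ['p'] (k : Int) none = -1 := by
      rw [PySem.Chars.findFrom_natCast data ['p'] k hk, hdrop]
      simp [show PySem.Chars.find ([] : List Char) ['p'] = -1 from by decide]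
    simp [hfc, hfp, hdrop, bools]
  | succ n ih =>
    intro k hk hn res
    cases ht : List.drop k data with
    | nil =>
      have hkl : data.length ≤ k := by
        have := congrArg List.length ht
        rw [List.length_drop] at this
        simp at this
        omega
      rw [findLoop]
      have hfc : PySem.Chars.findFrom data ['c'] (k : Int) none = -1 := by
        rw [PySem.Chars.findFrom_natCast data ['c'] k hk, ht]
        simp [show PySem.Chars.find ([] : List Char) ['c'] = -1 from by decide]
      have hfp : PySem.Chars.findFrom data ['p'] (k : Int) none = -1 := by
        rw [PySem.Chars.findFrom_natCast data ['p'] k hk, ht]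
        simp [show PySem.Chars.find ([] : List Char) ['p'] = -1 from by decide]
      simp [hfc, hfp, bools]
    | cons ch rest =>
      have hklt : k < data.length := by
        have := congrArg List.length ht
        rw [List.length_drop] at this
        simp at this
        omega
      have hk1 : k + 1 ≤ data.length := hklt
      have hdrop1 : List.drop (k + 1) data = rest := by
        have : List.drop (k + 1) data = List.drop 1 (List.drop k data) := by
          rw [List.drop_drop]
        rw [this, ht]
        rfl
      have hic : PySem.Chars.findFrom data ['c'] (k : Int) none =
          if PySem.Chars.find (ch :: rest) ['c'] = -1 then -1 else (k : Int) + PySem.Chars.find (ch :: rest) ['c'] := by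
        rw [PySem.Chars.findFrom_natCast data ['c'] k hk, ht]
      have hip : PySem.Chars.findFrom data ['p'] (k : Int) none =
          if PySem.Chars.find (ch :: rest) ['p'] = -1 then -1 else (k : Int) + PySem.Chars.find (ch :: rest) ['p'] := by
        rw [PySem.Chars.findFrom_natCast data ['p'] k hk, ht]
      by_cases hcc : ch = 'c'
      · -- head bit 0
        have hfc : PySem.Chars.find (ch :: rest) ['c'] = 0 := by
          rw [find_singleton_cons, if_pos hcc]
        have hicv : PySem.Chars.findFrom data ['c'] (k : Int) none = (k : Int) := by
          rw [hic, hfc]; norm_num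
        have hfp : PySem.Chars.find (ch :: rest) ['p'] =
            if PySem.Chars.find rest ['p'] = -1 then -1 else PySem.Chars.find rest ['p'] + 1 := by
          rw [find_singleton_cons, if_neg (by rw [hcc]; decide)]
        have hbranch : (PySem.Chars.findFrom data ['c'] (k : Int) none < PySem.Chars.findFrom data ['p'] (k : Int) none ∧
            PySem.Chars.findFrom data ['c'] (k : Int) none ≠ -1) ∨
            PySem.Chars.findFrom data ['p'] (k : Int) none = -1 := by
          by_cases hrp : PySem.Chars.find rest ['p'] = -1
          · right; rw [hip, hfp, if_pos hrp]; simp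
          · left
            have hge := PySem.Chars.neg_one_le_find rest ['p']
            constructor
            · rw [hicv, hip, hfp, if_neg hrp]
              rw [if_neg (by omega)]
              omega
            · rw [hicv]; omega
        rw [findLoop]
        rw [dif_neg (by rw [hicv]; intro hh; exact absurd hh.1 (by omega))]
        rw [dif_pos hbranch]
        have htn : (PySem.Chars.findFrom data ['c'] (k : Int) none).toNat + 1 = k + 1 := by
          rw [hicv]; omega
        rw [findLoop_congr data _ (k+1) _ (by omega)
              (res ++ ['0'])
              (by rw [htn]) (by rw [htn])]
        rw [ih (k+1) hk1 (by omega) (res ++ ['0'])]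
        rw [hdrop1]
        simp [bools, bitChar, hcc]
      · by_cases hpp : ch = 'p'
        · -- head bit 1
          have hfp0 : PySem.Chars.find (ch :: rest) ['p'] = 0 := by
            rw [find_singleton_cons, if_pos hpp]
          have hipv : PySem.Chars.findFrom data ['p'] (k : Int) none = (k : Int) := by
            rw [hip, hfp0]; norm_num
          have hfc : PySem.Chars.find (ch :: rest) ['c'] =
              if PySem.Chars.find rest ['c'] = -1 then -1 else PySem.Chars.find rest ['c'] + 1 := by
            rw [find_singleton_cons, if_neg (by rw [hpp]; decide)]
          have hnbranch : ¬ ((PySem.Chars.findFrom data ['c'] (k : Int) none < PySem.Chars.findFrom data ['p'] (k : Int) none ∧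
              PySem.Chars.findFrom data ['c'] (k : Int) none ≠ -1) ∨
              PySem.Chars.findFrom data ['p'] (k : Int) none = -1) := by
            rw [hipv, hic, hfc]
            intro hh
            rcases hh with ⟨hlt, hne⟩ | hz
            · by_cases hrc : PySem.Chars.find rest ['c'] = -1
              · rw [if_pos (by simp [hrc])] at hne
                exact hne rfl
              · have hge := PySem.Chars.neg_one_le_find rest ['c']
                rw [if_neg (by omega)] at hlt
                omega
            · omega
          rw [findLoop]
          rw [dif_neg (by rw [hipv]; intro hh; exact absurd hh.2 (by omega))]
          rw [dif_neg hnbranch]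
          rw [dif_pos (by rw [hipv]; omega)]
          have htn : (PySem.Chars.findFrom data ['p'] (k : Int) none).toNat + 1 = k + 1 := by
            rw [hipv]; omega
          rw [findLoop_congr data _ (k+1) _ (by omega)
                (res ++ ['1'])
                (by rw [htn]) (by rw [htn])]
          rw [ih (k+1) hk1 (by omega) (res ++ ['1'])]
          rw [hdrop1]
          simp [bools, bitChar, hpp]
        · -- head not a bit: both finds skip it
          have hfc : PySem.Chars.find (ch :: rest) ['c'] =
              if PySem.Chars.find rest ['c'] = -1 then -1 else PySem.Chars.find rest ['c'] + 1 := by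
            rw [find_singleton_cons, if_neg hcc]
          have hfp : PySem.Chars.find (ch :: rest) ['p'] =
              if PySem.Chars.find rest ['p'] = -1 then -1 else PySem.Chars.find rest ['p'] + 1 := by
            rw [find_singleton_cons, if_neg hpp]
          have hic1 : PySem.Chars.findFrom data ['c'] (k : Int) none =
              PySem.Chars.findFrom data ['c'] ((k+1 : Nat) : Int) none := by
            rw [hic, PySem.Chars.findFrom_natCast data ['c'] (k+1) hk1, hdrop1, hfc]
            have hge := PySem.Chars.neg_one_le_find rest ['c']
            by_cases hrc : PySem.Chars.find rest ['c'] = -1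
            · simp [hrc]
            · simp only [if_neg hrc]
              rw [if_neg (show ¬(PySem.Chars.find rest ['c'] + 1 = -1) from by omega)]
              push_cast
              ring
          have hip1 : PySem.Chars.findFrom data ['p'] (k : Int) none =
              PySem.Chars.findFrom data ['p'] ((k+1 : Nat) : Int) none := by
            rw [hip, PySem.Chars.findFrom_natCast data ['p'] (k+1) hk1, hdrop1, hfp]
            have hge := PySem.Chars.neg_one_le_find rest ['p']
            by_cases hrp : PySem.Chars.find rest ['p'] = -1
            · simp [hrp]
            · simp only [if_neg hrp]
              rw [if_neg (show ¬(PySem.Chars.find rest ['p'] + 1 = -1) from by omega)]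
              push_cast
              ring
          rw [findLoop_congr data k (k+1) hk hk1 res hic1 hip1]
          rw [ih (k+1) hk1 (by omega) res]
          rw [hdrop1]
          simp [bools, hcc, hpp]

-- int(chunk, 2) on an 8-bit binary chunk
theorem int_chunk8 : ∀ (a b c d e f g h : Bool),
    PySem.Int.ofCharsBase? ([a,b,c,d,e,f,g,h].map bitChar) 2 = some (valB [a,b,c,d,e,f,g,h]) := by
  decide

theorem int_chunk (bs : List Bool) (h : bs.length = 8) :
    PySem.Int.ofCharsBase? (bs.map bitChar) 2 = some (valB bs) := by
  match bs, h with
  | [a,b,c,d,e,f,g,h8], _ => exact int_chunk8 a b c d e f g h8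

-- decode as a map over chunk indices
theorem decode_eq_map : ∀ n (bs : List Bool), bs.length ≤ n →
    decode bs = (List.range (bs.length / 8)).map
      (fun i => emit (valB ((bs.drop (i*8)).take 8))) := by
  intro n
  induction n with
  | zero =>
    intro bs hn
    have : bs.length = 0 := by omega
    rw [decode, dif_neg (by omega)]
    rw [show bs.length / 8 = 0 from by omega]
    simp
  | succ n ih =>
    intro bs hn
    by_cases h8 : 8 ≤ bs.length
    · rw [decode, dif_pos h8]
      have hlen : (bs.drop 8).length = bs.length - 8 := by simp
      rw [ih (bs.drop 8) (by omega)]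
      have hdiv : bs.length / 8 = (bs.length - 8) / 8 + 1 := by omega
      rw [hdiv, hlen, List.range_succ_eq_map]
      rw [List.map_cons, List.map_map]
      refine List.cons_eq_cons.mpr ⟨by simp, ?_⟩
      apply List.map_congr_left
      intro i _
      simp only [Function.comp_apply]
      have h2 : 8 + i * 8 = Nat.succ i * 8 := by omega
      rw [List.drop_drop, h2]
    · rw [decode, dif_neg h8]
      rw [show bs.length / 8 = 0 from by omega]
      simp

-- A's ChangetoString on the materialised bit string = direct 8-bit decoding
theorem changetoString_eq_decode (bs : List Bool) :
    changetoString (bs.map bitChar) = decode bs := by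
  rw [changetoString]
  have hlen : (bs.map bitChar).length = bs.length := by simp
  rw [hlen]
  have hfd : PySem.Int.floordiv ((bs.length : Nat) : Int) 8 = ((bs.length / 8 : Nat) : Int) := by
    exact_mod_cast PySem.Int.floordiv_natCast bs.length 8
  rw [hfd, PySem.List.pyRange_zero_natCast]
  rw [List.foldl_map]
  rw [PySem.List.foldl_append_singleton_eq_map]
  rw [List.nil_append]
  rw [decode_eq_map bs.length bs (le_refl _)]
  apply List.map_congr_left
  intro i hi
  have hi8 : i * 8 + 8 ≤ bs.length := by
    rw [List.mem_range] at hi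
    omega
  have hsl : PySem.List.slice (bs.map bitChar) (some ((i:Int) * 8)) (some (((i:Int) + 1) * 8))
      = ((bs.drop (i*8)).take 8).map bitChar := by
    have h1 : ((i:Int) * 8) = ((i*8 : Nat) : Int) := by push_cast; ring
    have h2 : (((i:Int) + 1) * 8) = ((i*8+8 : Nat) : Int) := by push_cast; ring
    rw [h1, h2, PySem.List.slice_natCast]
    rw [← List.map_drop, ← List.map_take]
    have h3 : i * 8 + 8 - i * 8 = 8 := by omega
    rw [h3]
  rw [hsl]
  rw [int_chunk ((bs.drop (i*8)).take 8) (by simp; omega)]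
  rfl

-- B's character fold = the same fold over the bit stream
theorem fold_eq_bools : ∀ (l : List Char) (s : Int × Nat × List Char),
    l.foldl
      (fun (s : Int × Nat × List Char) ch =>
        if ch = 'c' ∨ ch = 'p' then
          let acc := s.1 * 2 + (if ch = 'p' then 1 else 0)
          let nbits := s.2.1 + 1
          if nbits = 8 then (0, 0, s.2.2 ++ [Char.ofNat (acc + 1040).toNat])
          else (acc, nbits, s.2.2)
        else s) s
    = (bools l).foldl bstep s := by
  intro l
  induction l with
  | nil => intro s; simp [bools]
  | cons ch rest ih =>
    intro s
    by_cases hcc : ch = 'c'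
    · subst hcc
      rw [List.foldl_cons, ih]
      simp [bools, bstep]
    · by_cases hpp : ch = 'p'
      · subst hpp
        rw [List.foldl_cons, ih]
        simp [bools, bstep]
      · rw [List.foldl_cons, ih]
        simp [bools, hcc, hpp]

theorem foldl_bstep_out : ∀ (bs : List Bool) (acc : Int) (nbits : Nat) (out : List Char),
    (bs.foldl bstep (acc, nbits, out)).2.2 = out ++ decodeFrom acc nbits bs := by
  intro bs
  induction bs with
  | nil => intro acc nbits out; simp [decodeFrom]
  | cons b rest ih =>
    intro acc nbits out
    rw [List.foldl_cons]
    by_cases h8 : nbits + 1 = 8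
    · have hb : bstep (acc, nbits, out) b = (0, 0, out ++ [emit (acc * 2 + (if b then 1 else 0))]) := by
        cases b <;> simp [bstep, emit, h8]
      rw [hb, ih, decodeFrom]
      simp [h8]
    · have hb : bstep (acc, nbits, out) b = (acc * 2 + (if b then 1 else 0), nbits + 1, out) := by
        cases b <;> simp [bstep, h8]
      rw [hb, ih, decodeFrom]
      simp [h8]

theorem valB_snoc (pb : List Bool) (b : Bool) :
    valB (pb ++ [b]) = valB pb * 2 + (if b then 1 else 0) := by
  simp [valB, List.foldl_append]

theorem decodeFrom_eq_decode : ∀ (bs pb : List Bool), pb.length < 8 →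
    decodeFrom (valB pb) pb.length bs = decode (pb ++ bs) := by
  intro bs
  induction bs with
  | nil =>
    intro pb hpb
    rw [decodeFrom, List.append_nil, decode, dif_neg (by omega)]
  | cons b rest ih =>
    intro pb hpb
    rw [decodeFrom]
    by_cases h8 : pb.length + 1 = 8
    · rw [if_pos h8]
      have h1 : valB pb * 2 + (if b then 1 else 0) = valB (pb ++ [b]) := (valB_snoc pb b).symm
      have h2 : decodeFrom 0 0 rest = decode rest := by
        have := ih [] (by simp)
        simpa [valB] using this
      rw [h1]
      have hsplit : pb ++ b :: rest = (pb ++ [b]) ++ rest := by simp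
      rw [hsplit]
      have hl : (pb ++ [b]).length = 8 := by simp; omega
      conv_rhs => rw [decode]
      rw [dif_pos (by simp; omega)]
      rw [List.take_left' hl, List.drop_left' hl, h2]
    · rw [if_neg h8]
      have h1 : valB pb * 2 + (if b then 1 else 0) = valB (pb ++ [b]) := (valB_snoc pb b).symm
      have h2 : pb.length + 1 = (pb ++ [b]).length := by simp
      rw [h1, h2, ih (pb ++ [b]) (by simp; omega)]
      simp

-- ===== VERDICT (by name: the statement is the Claim_ definition above) =====
theorem findSecretText_spec : Claim_equal_findSecretText := by
  unfold Claim_equal_findSecretText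
  intro data _
  unfold Spec_findSecretText
  show findSecretText data = findSecretText_alt data
  rw [findSecretText, findSecretText_alt]
  simp only []
  rw [fold_eq_bools]
  have hB : ((bools data.toList).foldl bstep ((0 : Int), (0 : Nat), ([] : List Char))).2.2
      = decode (bools data.toList) := by
    rw [foldl_bstep_out]
    have := decodeFrom_eq_decode (bools data.toList) [] (by decide)
    simpa [valB] using this
  rw [hB]
  rw [findLoop_eq data.toList data.toList.length 0 (Nat.zero_le _) (by omega) []]
  rw [List.drop_zero, List.nil_append]
  rw [changetoString_eq_decode]
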